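-- pv_equiv track=rewrite | github.com/123ang/local_llm | backend/app/ingestion/sql_importer.py | make_unique_table_name
-- ===== SOURCE A (Python) =====
-- def make_unique_table_name(
--     desired: str,
--     existing_names: set[str],
-- ) -> str:
--     """Return *desired* if unique, otherwise append _2, _3, … until unique."""
--     if desired not in existing_names:
--         return desired
--     suffix = 2
--     while f"{desired}_{suffix}" in existing_names:
--         suffix += 1
--     return f"{desired}_{suffix}"
-- ===== SOURCE B (Python) =====
-- def _suffix_num(name, prefix):
--     """Return n if name == prefix + canonical decimal of some n >= 2, else None."""
--     if not name.startswith(prefix):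
--         return None
--     tail = name[len(prefix):]
--     if not tail or not tail.isdigit() or tail[0] == "0":
--         return None
--     n = 0
--     for ch in tail:
--         n = 10 * n + (ord(ch) - 48)
--     return n if n >= 2 else None
--
--
-- def make_unique_table_name(desired, existing_names):
--     prefix = desired + "_"
--     base_taken = False
--     taken = set()
--     for name in existing_names:
--         if name == desired:
--             base_taken = True
--         else:
--             n = _suffix_num(name, prefix)
--             if n is not None:
--                 taken.add(n)
--     if not base_taken:
--         return desired
--     k = 2
--     for t in sorted(taken):
--         if t == k:
--             k += 1
--         else:
--             break
--     return f"{desired}_{k}"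
-- ===== Notes on version B (the rewrite author's own statement) =====
-- stated objective: alternative
-- what changed: Instead of probing candidate names desired, desired_2, desired_3, ... against the set, B makes one pass over existing_names parsing each name's canonical numeric suffix into a set of taken integers and then computes the smallest free suffix by a sorted mex scan; no candidate string is ever tested for membership.
import Mathlib
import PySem

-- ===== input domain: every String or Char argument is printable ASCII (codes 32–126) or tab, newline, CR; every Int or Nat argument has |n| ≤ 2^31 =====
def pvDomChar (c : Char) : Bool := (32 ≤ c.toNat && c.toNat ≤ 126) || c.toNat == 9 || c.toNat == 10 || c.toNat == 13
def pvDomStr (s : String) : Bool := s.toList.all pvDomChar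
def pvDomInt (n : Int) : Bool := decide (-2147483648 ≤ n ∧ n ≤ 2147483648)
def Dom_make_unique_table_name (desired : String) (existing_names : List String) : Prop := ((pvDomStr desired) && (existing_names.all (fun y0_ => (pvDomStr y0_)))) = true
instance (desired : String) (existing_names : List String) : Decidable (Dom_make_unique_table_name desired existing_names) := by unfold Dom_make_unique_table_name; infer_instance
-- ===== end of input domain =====

-- B replaces A's probe-candidates-until-free loop by a single pass over existing_names that
-- parses each name's canonical numeric suffix into a set of taken numbers and then finds the
-- smallest free suffix by a scan over the sorted taken set; same values, a different algorithm
-- of similar cost (no speed claim).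

-- ===== PORT A =====
-- the f-string f"{desired}_{suffix}", on the character-list side (String.toList bridges the
-- opaque String type; all computation is on List Char)
def aCand (ds : List Char) (suffix : Int) : List Char := ds ++ '_' :: PySem.Int.toChars suffix

-- A's `while f"{desired}_{suffix}" in existing_names: suffix += 1` loop, with fuel.
-- Fuel existing.length + 1 always suffices (the candidate strings are pairwise distinct, so at
-- most existing.length of them can be members — see exists_free below), so the fuel-0 fallback
-- (returning the current candidate unchecked) is never reached.
def aWhile (ds : List Char) (existing : List (List Char)) (suffix : Int) : Nat → List Char
  | 0 => aCand ds suffix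
  | f + 1 =>
    if existing.contains (aCand ds suffix) then
      aWhile ds existing (suffix + 1) f
    else
      aCand ds suffix

def make_unique_table_name (desired : String) (existing_names : List String) : String :=
  if (existing_names.map String.toList).contains desired.toList then
    String.ofList (aWhile desired.toList (existing_names.map String.toList) 2
      ((existing_names.map String.toList).length + 1))
  else
    desired

-- ===== PORT B =====
-- ord(ch) - 48, as an Int (exact: Python ord is the code point)
def bDigitVal (ch : Char) : Int := (ch.toNat : Int) - 48

-- the `n = 0; for ch in tail: n = 10*n + (ord(ch) - 48)` loop of _suffix_num
def bVal (tail : List Char) : Int := tail.foldl (fun n ch => 10 * n + bDigitVal ch) 0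

-- _suffix_num(name, prefix); the slice name[len(prefix):] with a nonnegative index is
-- List.drop (exact there); the Python locals tail and n are written out inline
def bSuffixNum (name pfx : List Char) : Option Int :=
  if PySem.Chars.startswith name pfx then
    if (name.drop pfx.length).isEmpty || !PySem.Chars.strIsdigit (name.drop pfx.length)
        || (name.drop pfx.length).headD ' ' == '0' then
      none
    else
      if 2 ≤ bVal (name.drop pfx.length) then some (bVal (name.drop pfx.length)) else none
  else
    none

-- the `for name in existing_names` pass building (base_taken, taken)
def bCollect (ds pfx : List Char) (existing : List (List Char)) : Bool × PySem.Set Int :=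
  existing.foldl
    (fun st name =>
      if name = ds then (true, st.2)
      else
        match bSuffixNum name pfx with
        | some n => (st.1, st.2.add n)
        | none => st)
    (false, PySem.Set.ofList [])

-- the `k = 2; for t in sorted(taken): if t == k: k += 1 else: break` mex scan
def bScan (ts : List Int) (k : Int) : Int :=
  match ts with
  | [] => k
  | t :: rest => if t = k then bScan rest (k + 1) else k

def make_unique_table_name_alt (desired : String) (existing_names : List String) : String :=
  if (bCollect desired.toList (desired.toList ++ ['_']) (existing_names.map String.toList)).1 then
    String.ofList (desired.toList ++ '_' :: PySem.Int.toChars (bScan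
      (PySem.List.sorted
        (bCollect desired.toList (desired.toList ++ ['_']) (existing_names.map String.toList)).2
        id false) 2))
  else
    desired

-- ===== PRECONDITION & SPEC =====
def Spec_make_unique_table_name (desired : String) (existing_names : List String) (out : String) : Prop := out = make_unique_table_name_alt desired existing_names
instance (desired : String) (existing_names : List String) (out : String) : Decidable (Spec_make_unique_table_name desired existing_names out) := by unfold Spec_make_unique_table_name; infer_instance

-- ===== CLAIM =====
def Claim_equal_make_unique_table_name : Prop := ∀ (desired : String) (existing_names : List String), Dom_make_unique_table_name desired existing_names → Spec_make_unique_table_name desired existing_names (make_unique_table_name desired existing_names)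

-- ===== LEMMAS AND PROOFS =====
-- the Nat-valued digit fold the proofs reason about (the port's bVal is its Int cast)
def natVal (cs : List Char) : Nat := cs.foldl (fun n c => 10 * n + (c.toNat - 48)) 0

theorem isdigit_iff_toNat (c : Char) :
    PySem.Chars.isdigit c = true ↔ 48 ≤ c.toNat ∧ c.toNat ≤ 57 := by
  simp only [PySem.Chars.isdigit, Bool.and_eq_true, decide_eq_true_eq, Char.le_def,
    UInt32.le_iff_toNat_le]
  exact Iff.rfl

theorem toNat_digitChar (d : Nat) (hd : d < 10) : (Nat.digitChar d).toNat = 48 + d := by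
  interval_cases d <;> rfl

theorem bVal_eq_natVal (cs : List Char) (h : ∀ c ∈ cs, PySem.Chars.isdigit c = true) :
    bVal cs = (natVal cs : Int) := by
  suffices hs : ∀ (a : Nat), cs.foldl (fun n ch => 10 * n + bDigitVal ch) (a : Int)
      = ((cs.foldl (fun n c => 10 * n + (c.toNat - 48)) a : Nat) : Int) by
    simpa using hs 0
  induction cs with
  | nil => intro a; simp
  | cons c t ih =>
    intro a
    have hc := (isdigit_iff_toNat c).mp (h c (List.mem_cons_self ..))
    have ht : ∀ x ∈ t, PySem.Chars.isdigit x = true := fun x hx => h x (List.mem_cons_of_mem _ hx)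
    simp only [List.foldl_cons]
    have : (10 * (a : Int) + bDigitVal c) = ((10 * a + (c.toNat - 48) : Nat) : Int) := by
      simp only [bDigitVal]; push_cast [Nat.cast_sub hc.1]; ring
    rw [this]
    exact ih ht (10 * a + (c.toNat - 48))

theorem natVal_toDigits (n : Nat) : natVal (Nat.toDigits 10 n) = n := by
  induction n using Nat.strong_induction_on with
  | _ n ih =>
    rw [Nat.toDigits_eq_if (by norm_num)]
    by_cases h : n < 10
    · simp only [if_pos h, natVal, List.foldl_cons, List.foldl_nil, toNat_digitChar n h]
      omega
    · simp only [if_neg h]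
      have hdiv : n / 10 < n := Nat.div_lt_self (by omega) (by norm_num)
      have : natVal (Nat.toDigits 10 (n / 10) ++ [Nat.digitChar (n % 10)])
          = 10 * natVal (Nat.toDigits 10 (n / 10)) + ((Nat.digitChar (n % 10)).toNat - 48) := by
        simp [natVal, List.foldl_append]
      rw [this, ih _ hdiv, toNat_digitChar _ (Nat.mod_lt _ (by norm_num))]
      omega

theorem toDigits_ne_nil (n : Nat) : Nat.toDigits 10 n ≠ [] := by
  have := Nat.length_toDigits_pos (b := 10) (n := n)
  intro h; simp [h] at this

theorem isdigit_of_mem_toDigits (n : Nat) (c : Char) (hc : c ∈ Nat.toDigits 10 n) :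
    PySem.Chars.isdigit c = true := by
  have h := Nat.isDigit_of_mem_toDigits (by norm_num) (by norm_num) hc
  rw [isdigit_iff_toNat]
  simpa only [Char.isDigit, Bool.and_eq_true, decide_eq_true_eq, Char.le_def,
    UInt32.le_iff_toNat_le] using h

theorem headD_toDigits_ne_zero (n : Nat) (hn : 1 ≤ n) :
    (Nat.toDigits 10 n).headD ' ' ≠ '0' := by
  induction n using Nat.strong_induction_on with
  | _ n ih =>
    rw [Nat.toDigits_eq_if (by norm_num)]
    by_cases h : n < 10
    · simp only [if_pos h, List.headD_cons]
      intro he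
      have := congrArg Char.toNat he
      rw [toNat_digitChar n h] at this
      simp only [show ('0' : Char).toNat = 48 from rfl] at this
      omega
    · simp only [if_neg h]
      obtain ⟨hd, tl, hcons⟩ := List.exists_cons_of_ne_nil (toDigits_ne_nil (n / 10))
      have hdiv : n / 10 < n := Nat.div_lt_self (by omega) (by norm_num)
      have h1 : 1 ≤ n / 10 := by omega
      have := ih _ hdiv h1
      rw [hcons] at this ⊢
      simpa using this

theorem le_foldl_val (t : List Char) :
    ∀ a : Nat, a ≤ t.foldl (fun n c => 10 * n + (c.toNat - 48)) a := by
  induction t with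
  | nil => intro a; simp
  | cons c t ih =>
    intro a
    simp only [List.foldl_cons]
    exact le_trans (by omega) (ih (10 * a + (c.toNat - 48)))

theorem natVal_pos (cs : List Char) (hne : cs ≠ [])
    (hdig : ∀ c ∈ cs, PySem.Chars.isdigit c = true) (hhd : cs.headD ' ' ≠ '0') :
    1 ≤ natVal cs := by
  obtain ⟨h, t, rfl⟩ := List.exists_cons_of_ne_nil hne
  have hd := (isdigit_iff_toNat h).mp (hdig h (List.mem_cons_self ..))
  have hh : h.toNat ≠ 48 := by
    intro he
    apply hhd
    simp only [List.headD_cons]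
    have : Char.ofNat h.toNat = Char.ofNat 48 := by rw [he]
    rwa [Char.ofNat_toNat] at this
  have h1 : 1 ≤ h.toNat - 48 := by omega
  simp only [natVal, List.foldl_cons]
  calc 1 ≤ 10 * 0 + (h.toNat - 48) := by omega
    _ ≤ _ := le_foldl_val t _

theorem digitChar_sub (c : Char) (hc : PySem.Chars.isdigit c = true) :
    Nat.digitChar (c.toNat - 48) = c := by
  have h := (isdigit_iff_toNat c).mp hc
  conv_rhs => rw [← Char.ofNat_toNat c]
  obtain ⟨h1, h2⟩ := h
  interval_cases h' : c.toNat <;> decide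

theorem toDigits_natVal (cs : List Char) (hne : cs ≠ [])
    (hdig : ∀ c ∈ cs, PySem.Chars.isdigit c = true) (hhd : cs.headD ' ' ≠ '0') :
    Nat.toDigits 10 (natVal cs) = cs := by
  induction cs using List.reverseRecOn with
  | nil => exact absurd rfl hne
  | append_singleton xs c ih =>
    have hc := (isdigit_iff_toNat c).mp (hdig c (by simp))
    have hval : natVal (xs ++ [c]) = 10 * natVal xs + (c.toNat - 48) := by
      simp [natVal, List.foldl_append]
    by_cases hxs : xs = []
    · subst hxs
      simp only [List.nil_append] at hval ⊢
      rw [hval]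
      have : 10 * natVal ([] : List Char) + (c.toNat - 48) = c.toNat - 48 := by
        simp [natVal]
      rw [this, Nat.toDigits_of_lt_base (by omega), digitChar_sub c (hdig c (by simp))]
    · obtain ⟨h, t, rfl⟩ := List.exists_cons_of_ne_nil hxs
      have hdig' : ∀ x ∈ h :: t, PySem.Chars.isdigit x = true :=
        fun x hx => hdig x (by
          rcases List.mem_cons.mp hx with rfl | hx
          · exact List.mem_cons_self ..
          · exact List.mem_cons_of_mem _ (List.mem_append_left _ hx))
      have hhd' : (h :: t).headD ' ' ≠ '0' := by simpa using hhd
      have hpos : 1 ≤ natVal (h :: t) := natVal_pos _ (by simp) hdig' hhd'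
      rw [hval]
      rw [← Nat.toDigits_append_toDigits (by norm_num) (by omega) (by omega)]
      rw [ih (by simp) hdig' hhd']
      rw [Nat.toDigits_of_lt_base (by omega), digitChar_sub c (hdig c (by simp))]

theorem toChars_nonneg (k : Int) (hk : 0 ≤ k) :
    PySem.Int.toChars k = Nat.toDigits 10 k.toNat := by
  simp [PySem.Int.toChars, Int.not_lt.mpr hk]

theorem bSuffixNum_eq_some_iff (name pfx : List Char) (m : Int) :
    bSuffixNum name pfx = some m ↔ 2 ≤ m ∧ name = pfx ++ PySem.Int.toChars m := by
  constructor
  · intro h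
    unfold bSuffixNum at h
    split at h
    case isTrue hsw =>
      obtain ⟨t, rfl⟩ := (PySem.Chars.startswith_iff _ _).mp hsw
      rw [List.drop_left] at h
      split at h
      case isTrue => exact absurd h (by simp)
      case isFalse hcond =>
        simp only [Bool.or_eq_true, Bool.not_eq_true', beq_iff_eq, not_or] at hcond
        obtain ⟨⟨hne', hdig'⟩, hhd'⟩ := hcond
        have hne : t ≠ [] := by simpa [List.isEmpty_iff] using hne'
        have hdig : ∀ c ∈ t, PySem.Chars.isdigit c = true := by
          simp only [PySem.Chars.strIsdigit, Bool.not_eq_false, Bool.and_eq_true,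
            List.all_eq_true] at hdig'
          exact fun c hc => hdig'.2 c hc
        have hhd : t.headD ' ' ≠ '0' := by simpa using hhd'
        split at h
        case isFalse => exact absurd h (by simp)
        case isTrue h2 =>
          obtain rfl : bVal t = m := by simpa using h
          refine ⟨h2, ?_⟩
          rw [toChars_nonneg _ (by rw [bVal_eq_natVal t hdig]; positivity)]
          rw [bVal_eq_natVal t hdig, Int.toNat_natCast, toDigits_natVal t hne hdig hhd]
    case isFalse => exact absurd h (by simp)
  · rintro ⟨h2, rfl⟩
    have h0 : (0:Int) ≤ m := by omega
    have h1 : 1 ≤ m.toNat := by omega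
    have htc : PySem.Int.toChars m = Nat.toDigits 10 m.toNat := toChars_nonneg m h0
    have hdig : ∀ c ∈ PySem.Int.toChars m, PySem.Chars.isdigit c = true := by
      rw [htc]; exact isdigit_of_mem_toDigits m.toNat
    have hne : PySem.Int.toChars m ≠ [] := by rw [htc]; exact toDigits_ne_nil _
    have hhd : (PySem.Int.toChars m).headD ' ' ≠ '0' := by
      rw [htc]; exact headD_toDigits_ne_zero _ h1
    have hval : bVal (PySem.Int.toChars m) = m := by
      rw [bVal_eq_natVal _ hdig, htc, natVal_toDigits]
      omega
    unfold bSuffixNum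
    rw [if_pos ((PySem.Chars.startswith_iff _ _).mpr (List.prefix_append _ _))]
    rw [List.drop_left]
    rw [if_neg (by
      simp only [Bool.or_eq_true, Bool.not_eq_true', beq_iff_eq, not_or]
      refine ⟨⟨by simpa [List.isEmpty_iff] using hne, ?_⟩, by simpa using hhd⟩
      simp only [PySem.Chars.strIsdigit, Bool.not_eq_false, Bool.and_eq_true, List.all_eq_true]
      exact ⟨by simpa [List.isEmpty_iff] using hne, fun c hc => hdig c hc⟩)]
    simp only [hval, if_pos h2]

theorem bCollect_gen (ds pfx : List Char) (ex : List (List Char)) :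
    ∀ st : Bool × PySem.Set Int,
      (ex.foldl (fun st name =>
        if name = ds then (true, st.2)
        else match bSuffixNum name pfx with
          | some n => (st.1, st.2.add n)
          | none => st) st).1 = (st.1 || ex.contains ds) ∧
      (∀ m : Int, m ∈ (ex.foldl (fun st name =>
        if name = ds then (true, st.2)
        else match bSuffixNum name pfx with
          | some n => (st.1, st.2.add n)
          | none => st) st).2 ↔
        m ∈ st.2 ∨ ∃ name ∈ ex, name ≠ ds ∧ bSuffixNum name pfx = some m) ∧
      ((st.2 : List Int).Nodup →
        ((ex.foldl (fun st name =>
          if name = ds then (true, st.2)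
          else match bSuffixNum name pfx with
            | some n => (st.1, st.2.add n)
            | none => st) st).2 : List Int).Nodup) := by
  induction ex with
  | nil => intro st; simp
  | cons name rest ih =>
    intro st
    simp only [List.foldl_cons, List.contains_cons]
    by_cases hname : name = ds
    · subst hname
      rw [if_pos rfl]
      obtain ⟨i1, i2, i3⟩ := ih (true, st.2)
      refine ⟨by simp [i1], ?_, i3⟩
      intro m
      rw [i2 m]
      constructor
      · rintro (hm | ⟨nm, hnm, hne, hp⟩)
        · exact Or.inl hm
        · exact Or.inr ⟨nm, List.mem_cons_of_mem _ hnm, hne, hp⟩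
      · rintro (hm | ⟨nm, hnm, hne, hp⟩)
        · exact Or.inl hm
        · rcases List.mem_cons.mp hnm with rfl | hnm
          · exact absurd rfl hne
          · exact Or.inr ⟨nm, hnm, hne, hp⟩
    · rw [if_neg hname]
      have hbeq : (name == ds) = false := by simpa using hname
      cases hp : bSuffixNum name pfx with
      | none =>
        obtain ⟨i1, i2, i3⟩ := ih st
        refine ⟨by simp [i1, show (ds == name) = false by simpa using Ne.symm hname], ?_, i3⟩
        intro m
        rw [i2 m]
        constructor
        · rintro (hm | ⟨nm, hnm, hne, hq⟩)
          · exact Or.inl hm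
          · exact Or.inr ⟨nm, List.mem_cons_of_mem _ hnm, hne, hq⟩
        · rintro (hm | ⟨nm, hnm, hne, hq⟩)
          · exact Or.inl hm
          · rcases List.mem_cons.mp hnm with rfl | hnm
            · rw [hp] at hq; exact absurd hq (by simp)
            · exact Or.inr ⟨nm, hnm, hne, hq⟩
      | some n =>
        obtain ⟨i1, i2, i3⟩ := ih (st.1, st.2.add n)
        refine ⟨by simp [i1, show (ds == name) = false by simpa using Ne.symm hname], ?_, fun hnd => i3 (PySem.Set.nodup_add _ _ hnd)⟩
        intro m
        rw [i2 m]
        simp only [PySem.Set.mem_add]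
        constructor
        · rintro ((hm | rfl) | ⟨nm, hnm, hne, hq⟩)
          · exact Or.inl hm
          · exact Or.inr ⟨name, List.mem_cons_self .., hname, hp⟩
          · exact Or.inr ⟨nm, List.mem_cons_of_mem _ hnm, hne, hq⟩
        · rintro (hm | ⟨nm, hnm, hne, hq⟩)
          · exact Or.inl (Or.inl hm)
          · rcases List.mem_cons.mp hnm with rfl | hnm
            · rw [hp] at hq
              exact Or.inl (Or.inr (by simpa using hq.symm))
            · exact Or.inr ⟨nm, hnm, hne, hq⟩

theorem bCollect_fst (ds pfx : List Char) (ex : List (List Char)) :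
    (bCollect ds pfx ex).1 = ex.contains ds := by
  have := (bCollect_gen ds pfx ex (false, PySem.Set.ofList [])).1
  simpa [bCollect] using this

theorem bCollect_mem (ds pfx : List Char) (ex : List (List Char)) (m : Int) :
    m ∈ (bCollect ds pfx ex).2 ↔ ∃ name ∈ ex, name ≠ ds ∧ bSuffixNum name pfx = some m := by
  have := ((bCollect_gen ds pfx ex (false, PySem.Set.ofList [])).2.1) m
  simpa [bCollect, PySem.Set.ofList] using this

theorem bCollect_nodup (ds pfx : List Char) (ex : List (List Char)) :
    ((bCollect ds pfx ex).2 : List Int).Nodup := by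
  have := (bCollect_gen ds pfx ex (false, PySem.Set.ofList [])).2.2
  exact this (by simp [PySem.Set.ofList])

theorem bScan_spec (ts : List Int) : ∀ k : Int, List.Pairwise (· < ·) ts →
    (∀ t ∈ ts, k ≤ t) →
    k ≤ bScan ts k ∧ bScan ts k ∉ ts ∧ ∀ m, k ≤ m → m < bScan ts k → m ∈ ts := by
  induction ts with
  | nil => intro k _ _; refine ⟨le_refl _, by simp, fun m h1 h2 => absurd (lt_of_le_of_lt h1 h2) (by simp [bScan])⟩
  | cons t rest ih =>
    intro k hp hge
    have hpr : List.Pairwise (· < ·) rest := hp.of_cons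
    by_cases ht : t = k
    · subst ht
      have hge' : ∀ x ∈ rest, t + 1 ≤ x := by
        intro x hx
        have := (List.pairwise_cons.mp hp).1 x hx
        omega
      obtain ⟨h1, h2, h3⟩ := ih (t + 1) hpr hge'
      rw [show bScan (t :: rest) t = bScan rest (t + 1) by simp [bScan]]
      refine ⟨by omega, ?_, ?_⟩
      · intro hmem
        rcases List.mem_cons.mp hmem with he | hmem
        · omega
        · exact h2 hmem
      · intro m hm1 hm2
        rcases eq_or_lt_of_le hm1 with rfl | hlt
        · exact List.mem_cons_self ..
        · exact List.mem_cons_of_mem _ (h3 m (by omega) hm2)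
    · rw [show bScan (t :: rest) k = k by simp [bScan, ht]]
      refine ⟨le_refl _, ?_, fun m h1 h2 => absurd (lt_of_le_of_lt h1 h2) (lt_irrefl _)⟩
      intro hmem
      rcases List.mem_cons.mp hmem with rfl | hmem
      · exact ht rfl
      · have h1 := (List.pairwise_cons.mp hp).1 _ hmem
        have h2 := hge _ (List.mem_cons_self ..)
        omega

theorem aWhile_spec (ds : List Char) (ex : List (List Char)) :
    ∀ (f : Nat) (s : Int), (∃ j : Nat, j ≤ f ∧ aCand ds (s + j) ∉ ex) →
      ∃ r, aWhile ds ex s f = aCand ds r ∧ s ≤ r ∧ aCand ds r ∉ ex ∧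
        ∀ m, s ≤ m → m < r → aCand ds m ∈ ex := by
  intro f
  induction f with
  | zero =>
    intro s ⟨j, hj, hfree⟩
    interval_cases j
    simp only [Int.natCast_zero, add_zero] at hfree
    exact ⟨s, rfl, le_refl _, hfree, fun m h1 h2 => absurd (lt_of_le_of_lt h1 h2) (lt_irrefl _)⟩
  | succ f ih =>
    intro s ⟨j, hj, hfree⟩
    by_cases hc : ex.contains (aCand ds s) = true
    · have hmem : aCand ds s ∈ ex := by simpa using hc
      have hj0 : j ≠ 0 := by rintro rfl; simp at hfree; exact hfree hmem
      obtain ⟨j', rfl⟩ := Nat.exists_eq_succ_of_ne_zero hj0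
      have : aCand ds (s + 1 + j') ∉ ex := by
        have : s + (j' + 1 : Nat) = s + 1 + (j' : Int) := by push_cast; ring
        rwa [this] at hfree
      obtain ⟨r, hr, hle, hfr, hint⟩ := ih (s + 1) ⟨j', by omega, this⟩
      refine ⟨r, ?_, by omega, hfr, ?_⟩
      · simp only [aWhile]
        rw [if_pos hc]
        exact hr
      · intro m h1 h2
        rcases eq_or_lt_of_le h1 with rfl | hlt
        · exact hmem
        · exact hint m (by omega) h2
    · refine ⟨s, ?_, le_refl _, by simpa using hc,
        fun m h1 h2 => absurd (lt_of_le_of_lt h1 h2) (lt_irrefl _)⟩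
      simp only [aWhile]
      rw [if_neg hc]

theorem aCand_inj (ds : List Char) (a b : Int) (ha : 0 ≤ a) (hb : 0 ≤ b)
    (h : aCand ds a = aCand ds b) : a = b := by
  unfold aCand at h
  have h2 := List.append_cancel_left h
  have h3 : PySem.Int.toChars a = PySem.Int.toChars b := by
    simpa using h2
  rw [toChars_nonneg a ha, toChars_nonneg b hb] at h3
  have := congrArg natVal h3
  rw [natVal_toDigits, natVal_toDigits] at this
  omega

theorem exists_free (ds : List Char) (ex : List (List Char)) :
    ∃ j : Nat, j ≤ ex.length ∧ aCand ds (2 + j) ∉ ex := by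
  by_contra hall
  push Not at hall
  have hmem : ∀ j ∈ Finset.range (ex.length + 1), aCand ds (2 + j) ∈ ex.toFinset := by
    intro j hj
    rw [List.mem_toFinset]
    exact hall j (by simpa using Nat.lt_succ_iff.mp (Finset.mem_range.mp hj))
  have hinj : Set.InjOn (fun j : Nat => aCand ds (2 + j)) (Finset.range (ex.length + 1)) := by
    intro a _ b _ hab
    have := aCand_inj ds (2 + a) (2 + b) (by positivity) (by positivity) hab
    omega
  have hsub : (Finset.range (ex.length + 1)).image (fun j : Nat => aCand ds (2 + j)) ⊆ ex.toFinset := by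
    intro x hx
    obtain ⟨j, hj, rfl⟩ := Finset.mem_image.mp hx
    exact hmem j hj
  have hcard := Finset.card_le_card hsub
  rw [Finset.card_image_of_injOn hinj, Finset.card_range] at hcard
  have := ex.toFinset_card_le
  omega

theorem core_eq (ds : List Char) (ex : List (List Char)) :
    aWhile ds ex 2 (ex.length + 1)
      = aCand ds (bScan (PySem.List.sorted (bCollect ds (ds ++ ['_']) ex).2 id false) 2) := by
  have hmemT : ∀ m : Int, m ∈ (bCollect ds (ds ++ ['_']) ex).2 ↔ 2 ≤ m ∧ aCand ds m ∈ ex := by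
    intro m
    rw [bCollect_mem]
    constructor
    · rintro ⟨name, hname, hne, hp⟩
      obtain ⟨h2, rfl⟩ := (bSuffixNum_eq_some_iff _ _ _).mp hp
      refine ⟨h2, ?_⟩
      rwa [show (ds ++ ['_']) ++ PySem.Int.toChars m = aCand ds m by simp [aCand]] at hname
    · rintro ⟨h2, hmem⟩
      refine ⟨aCand ds m, hmem, ?_, (bSuffixNum_eq_some_iff _ _ _).mpr ⟨h2, by simp [aCand]⟩⟩
      intro heq
      have := congrArg List.length heq
      simp [aCand] at this
  have hSmem : ∀ m : Int, m ∈ PySem.List.sorted (bCollect ds (ds ++ ['_']) ex).2 id false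
      ↔ m ∈ (bCollect ds (ds ++ ['_']) ex).2 :=
    fun m => PySem.List.mem_sorted _ id false m
  have hSpair : List.Pairwise (· < ·) (PySem.List.sorted (bCollect ds (ds ++ ['_']) ex).2 id false) := by
    have hle := PySem.List.sorted_pairwise (bCollect ds (ds ++ ['_']) ex).2 (id : Int → Int)
    have hnd : (PySem.List.sorted (bCollect ds (ds ++ ['_']) ex).2 id false).Nodup :=
      (PySem.List.sorted_perm _ id false).nodup_iff.mpr (bCollect_nodup ds _ ex)
    exact (hle.and hnd).imp (fun h => lt_of_le_of_ne h.1 h.2)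
  have hge : ∀ t ∈ PySem.List.sorted (bCollect ds (ds ++ ['_']) ex).2 id false, (2:Int) ≤ t :=
    fun t ht => ((hmemT t).mp ((hSmem t).mp ht)).1
  obtain ⟨hble, hbfree, hbint⟩ := bScan_spec _ 2 hSpair hge
  have hBfree : aCand ds (bScan (PySem.List.sorted (bCollect ds (ds ++ ['_']) ex).2 id false) 2) ∉ ex :=
    fun hmem => hbfree ((hSmem _).mpr ((hmemT _).mpr ⟨hble, hmem⟩))
  have hBint : ∀ m, 2 ≤ m → m < bScan (PySem.List.sorted (bCollect ds (ds ++ ['_']) ex).2 id false) 2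
      → aCand ds m ∈ ex :=
    fun m h1 h2 => ((hmemT m).mp ((hSmem m).mp (hbint m h1 h2))).2
  obtain ⟨j, hj, hjf⟩ := exists_free ds ex
  obtain ⟨rA, hrA, hale, hafree, haint⟩ :=
    aWhile_spec ds ex (ex.length + 1) 2 ⟨j, by omega, hjf⟩
  rw [hrA]
  congr 1
  rcases lt_trichotomy rA (bScan (PySem.List.sorted (bCollect ds (ds ++ ['_']) ex).2 id false) 2)
    with h | h | h
  · exact absurd (hBint rA hale h) hafree
  · exact h
  · exact absurd (haint _ hble h) hBfree

theorem main_eq (desired : String) (existing_names : List String) :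
    make_unique_table_name desired existing_names = make_unique_table_name_alt desired existing_names := by
  rw [make_unique_table_name, make_unique_table_name_alt, bCollect_fst]
  by_cases hc : (existing_names.map String.toList).contains desired.toList = true
  · rw [if_pos hc, if_pos hc]
    have := core_eq desired.toList (existing_names.map String.toList)
    rw [aCand] at this
    exact congrArg String.ofList this
  · rw [if_neg hc, if_neg hc]

-- ===== VERDICT =====
theorem make_unique_table_name_spec : Claim_equal_make_unique_table_name := by
  intro desired existing_names _
  unfold Spec_make_unique_table_name
  exact main_eq desired existing_names
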